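-- pv_equiv track=rewrite | github.com/QQtangCrypt/RX-Differential-ARX | Ballet/RXballet128-256.py | CountCluseRoundFunction
-- ===== SOURCE A (Python) =====
-- HalfBlockSize = 32
--
-- def CountCluseRoundFunction(Round, clausesum):
--     count = clausesum
--     # nonzero input
--     count = count + 1
--     for r in range(0, Round):
--         for i in range(0, HalfBlockSize):
--             count = count + 4
--         for i in range(0, HalfBlockSize - 2):
--             count = count + 8
--         #count = count + 4
--         for i in range(0, HalfBlockSize - 2):
--             count = count + 5
--         for i in range(0, 1):
--             count = count + 11
--         for i in range(0, HalfBlockSize - 2):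
--             count = count + 8
--         #count = count + 4
--         for i in range(0, HalfBlockSize - 2):
--             count = count + 5
--         for i in range(0, 1):
--             count = count + 11
--         for i in range(0, HalfBlockSize):
--             count = count + 60
--         #for i in range(0,2*HalfBlockSize):
--             #count=count+2
--
--     return count
-- ===== SOURCE B (Python) =====
-- HalfBlockSize = 32
--
-- def CountCluseRoundFunction(Round, clausesum):
--     # closed form: each round adds a fixed 2850 clauses
--     return clausesum + 1 + max(Round, 0) * 2850
-- ===== Notes on version B (the rewrite author's own statement) =====
-- stated objective: faster
-- what changed: Replaced the nested per-round/per-bit accumulation loops with the closed form clausesum + 1 + max(Round,0)*2850.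
import Mathlib
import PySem

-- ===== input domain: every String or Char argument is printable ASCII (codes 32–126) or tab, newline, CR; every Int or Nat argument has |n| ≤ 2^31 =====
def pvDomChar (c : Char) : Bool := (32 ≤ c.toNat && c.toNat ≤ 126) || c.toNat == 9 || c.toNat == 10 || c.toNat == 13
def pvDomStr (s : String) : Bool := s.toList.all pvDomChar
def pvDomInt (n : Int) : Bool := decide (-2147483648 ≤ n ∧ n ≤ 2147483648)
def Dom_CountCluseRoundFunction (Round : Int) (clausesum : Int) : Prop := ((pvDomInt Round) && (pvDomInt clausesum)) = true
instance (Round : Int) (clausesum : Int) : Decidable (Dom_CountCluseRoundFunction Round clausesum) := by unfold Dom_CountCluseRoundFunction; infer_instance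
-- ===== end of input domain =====

-- B replaces A's nested constant-increment loops with the closed form clausesum + 1 + max(Round,0)*2850 (faster: O(1) vs O(Round)).

-- ===== PORT A =====
def pvHalfBlockSize : Int := 32

def CountCluseRoundFunction (Round : Int) (clausesum : Int) : Int :=
  let count := clausesum
  let count := count + 1
  (PySem.List.pyRange 0 Round 1).foldl (fun count _r =>
    let count := (PySem.List.pyRange 0 pvHalfBlockSize 1).foldl (fun c _i => c + 4) count
    let count := (PySem.List.pyRange 0 (pvHalfBlockSize - 2) 1).foldl (fun c _i => c + 8) count
    let count := (PySem.List.pyRange 0 (pvHalfBlockSize - 2) 1).foldl (fun c _i => c + 5) count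
    let count := (PySem.List.pyRange 0 1 1).foldl (fun c _i => c + 11) count
    let count := (PySem.List.pyRange 0 (pvHalfBlockSize - 2) 1).foldl (fun c _i => c + 8) count
    let count := (PySem.List.pyRange 0 (pvHalfBlockSize - 2) 1).foldl (fun c _i => c + 5) count
    let count := (PySem.List.pyRange 0 1 1).foldl (fun c _i => c + 11) count
    (PySem.List.pyRange 0 pvHalfBlockSize 1).foldl (fun c _i => c + 60) count) count

-- ===== PORT B =====
def CountCluseRoundFunction_alt (Round : Int) (clausesum : Int) : Int :=
  clausesum + 1 + max Round 0 * 2850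

-- ===== PRECONDITION & SPEC =====
def Spec_CountCluseRoundFunction (Round : Int) (clausesum : Int) (out : Int) : Prop := out = CountCluseRoundFunction_alt Round clausesum
instance (Round : Int) (clausesum : Int) (out : Int) : Decidable (Spec_CountCluseRoundFunction Round clausesum out) := by unfold Spec_CountCluseRoundFunction; infer_instance

-- ===== CLAIM (what is proved, stated in full; the proofs are below) =====
def Claim_equal_CountCluseRoundFunction : Prop := ∀ (Round : Int) (clausesum : Int), Dom_CountCluseRoundFunction Round clausesum → Spec_CountCluseRoundFunction Round clausesum (CountCluseRoundFunction Round clausesum)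

-- ===== LEMMAS AND PROOFS =====
-- a fold that adds a fixed k per element adds k * length in total
theorem pv_foldl_const_add {α : Type} (l : List α) (k a : Int) :
    l.foldl (fun c _ => c + k) a = a + k * l.length := by
  induction l generalizing a with
  | nil => simp
  | cons x xs ih =>
      simp only [List.foldl, List.length_cons, ih (a + k)]
      push_cast; ring

-- one iteration of A's round body adds exactly 2850 regardless of the loop variable
theorem pv_round_add (c r : Int) :
    (PySem.List.pyRange 0 pvHalfBlockSize 1).foldl (fun c _i => c + 60)
      ((PySem.List.pyRange 0 1 1).foldl (fun c _i => c + 11)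
        ((PySem.List.pyRange 0 (pvHalfBlockSize - 2) 1).foldl (fun c _i => c + 5)
          ((PySem.List.pyRange 0 (pvHalfBlockSize - 2) 1).foldl (fun c _i => c + 8)
            ((PySem.List.pyRange 0 1 1).foldl (fun c _i => c + 11)
              ((PySem.List.pyRange 0 (pvHalfBlockSize - 2) 1).foldl (fun c _i => c + 5)
                ((PySem.List.pyRange 0 (pvHalfBlockSize - 2) 1).foldl (fun c _i => c + 8)
                  ((PySem.List.pyRange 0 pvHalfBlockSize 1).foldl (fun c _i => c + 4) c)))))))
    = c + 2850 := by
  simp only [pv_foldl_const_add, PySem.List.length_pyRange_one, pvHalfBlockSize]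
  omega

-- a fold whose step adds a constant k (pointwise) adds k * length in total
theorem pv_foldl_body_add {α : Type} (F : Int → α → Int) (k : Int)
    (h : ∀ c r, F c r = c + k) (l : List α) (a : Int) :
    l.foldl F a = a + k * l.length := by
  induction l generalizing a with
  | nil => simp
  | cons x xs ih =>
      simp only [List.foldl, List.length_cons, h, ih (a + k)]
      push_cast; ring

-- ===== VERDICT (by name: the statement is the Claim_ definition above) =====
theorem CountCluseRoundFunction_spec : Claim_equal_CountCluseRoundFunction := by
  intro Round clausesum _
  show CountCluseRoundFunction Round clausesum = CountCluseRoundFunction_alt Round clausesum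
  unfold CountCluseRoundFunction CountCluseRoundFunction_alt
  rw [pv_foldl_body_add _ 2850 (fun c r => pv_round_add c r)]
  rw [PySem.List.length_pyRange_one]
  omega
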